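-- pv_equiv track=rewrite | github.com/mys1erious/cole_medin_agentic_rag | iot_docs_rag/preprocess_doc.py | _get_pages_for_chunk
-- ===== SOURCE A (Python) =====
-- def _get_pages_for_chunk(
--
--     chunk_start: int,
--     chunk_end: int,
--     page_breaks: dict[int, int],
--     total_pages: int,
-- ) -> list[int]:
--     """Determine which pages a chunk spans."""
--     pages = set()
--
--     # Find the exact page range for the chunk
--     chunk_start_page = 1  # Default to first page
--     chunk_end_page = 1  # Default to first page
--
--     # Sort page breaks for consistent processing
--     sorted_breaks = sorted(page_breaks.items())
--
--     # Find the starting page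
--     for line_num, page_num in sorted_breaks:
--         if line_num <= chunk_start:
--             chunk_start_page = page_num
--         else:
--             break
--
--     # Find the ending page
--     for line_num, page_num in sorted_breaks:
--         if line_num <= chunk_end:
--             chunk_end_page = page_num
--         else:
--             break
--
--     # Add all pages in the range
--     for page in range(chunk_start_page, chunk_end_page + 1):
--         if page <= total_pages:  # Ensure we don't exceed total pages
--             pages.add(page)
--
--     return sorted(list(pages))
-- ===== SOURCE B (Python) =====
-- def _get_pages_for_chunk(
--     chunk_start: int,
--     chunk_end: int,
--     page_breaks: dict[int, int],
--     total_pages: int,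
-- ) -> list[int]:
--     """Determine which pages a chunk spans.
--
--     Single linear pass over the breaks (no sorting): keep the lexicographically
--     largest (line, page) break at or before each chunk boundary, then emit the
--     page range directly (already sorted and duplicate-free).
--     """
--     best_start = None
--     best_end = None
--     for line, page in page_breaks.items():
--         if line <= chunk_start and (best_start is None or best_start <= (line, page)):
--             best_start = (line, page)
--         if line <= chunk_end and (best_end is None or best_end <= (line, page)):
--             best_end = (line, page)
--     start_page = best_start[1] if best_start is not None else 1
--     end_page = best_end[1] if best_end is not None else 1
--     return list(range(start_page, min(end_page, total_pages) + 1))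
-- ===== Notes on version B (the rewrite author's own statement) =====
-- stated objective: faster
-- what changed: Replaces sort-then-scan-with-break (twice) plus a set-filtered range that is sorted again by one linear pass tracking the lexicographically largest break at or before each boundary, emitting the page range directly.
import Mathlib
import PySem

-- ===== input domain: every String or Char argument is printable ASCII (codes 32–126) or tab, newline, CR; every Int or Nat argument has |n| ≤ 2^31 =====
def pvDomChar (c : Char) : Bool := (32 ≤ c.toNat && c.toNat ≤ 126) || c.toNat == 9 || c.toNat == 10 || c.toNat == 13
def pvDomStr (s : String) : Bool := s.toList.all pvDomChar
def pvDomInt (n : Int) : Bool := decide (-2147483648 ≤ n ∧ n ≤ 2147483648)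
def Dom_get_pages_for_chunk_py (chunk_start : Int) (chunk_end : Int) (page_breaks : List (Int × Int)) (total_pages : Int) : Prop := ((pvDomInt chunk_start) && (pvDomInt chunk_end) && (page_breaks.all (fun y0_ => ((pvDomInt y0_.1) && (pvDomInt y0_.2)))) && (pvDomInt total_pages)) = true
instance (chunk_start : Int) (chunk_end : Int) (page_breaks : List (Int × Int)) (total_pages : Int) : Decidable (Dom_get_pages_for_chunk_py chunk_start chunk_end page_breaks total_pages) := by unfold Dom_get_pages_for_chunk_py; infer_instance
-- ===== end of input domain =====

-- B replaces A's sort-then-scan (twice) and set-filtered re-sorted range by one linear pass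
-- keeping the lexicographically largest break at or before each boundary (objective: faster).

-- ===== PORT A =====
-- A's two 'for … else break' loops over the sorted breaks (break = return the accumulator)
def pvFindPage (thr : Int) : List (Int × Int) → Int → Int
  | [], acc => acc
  | (line_num, page_num) :: rest, acc =>
      if line_num ≤ thr then pvFindPage thr rest page_num else acc

def get_pages_for_chunk_py (chunk_start : Int) (chunk_end : Int) (page_breaks : List (Int × Int)) (total_pages : Int) : List Int :=
  let sorted_breaks := PySem.List.sorted2 page_breaks Prod.fst Prod.snd
  let chunk_start_page := pvFindPage chunk_start sorted_breaks 1
  let chunk_end_page := pvFindPage chunk_end sorted_breaks 1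
  let pages : PySem.Set Int :=
    (PySem.List.pyRange chunk_start_page (chunk_end_page + 1) 1).foldl
      (fun s page => if page ≤ total_pages then PySem.Set.add s page else s) PySem.Set.empty
  PySem.List.sorted pages (fun x => x)

-- ===== PORT B =====
-- B's loop body: fold the running lexicographic maximum of the breaks at or before thr
def pvStep (thr : Int) : Option (Int × Int) → (Int × Int) → Option (Int × Int)
  | none, e => if e.1 ≤ thr then some e else none
  | some m, e => if e.1 ≤ thr ∧ (m.1 < e.1 ∨ (m.1 = e.1 ∧ m.2 ≤ e.2)) then some e else some m

def pvPage : Option (Int × Int) → Int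
  | none => 1
  | some m => m.2

def get_pages_for_chunk_py_alt (chunk_start : Int) (chunk_end : Int) (page_breaks : List (Int × Int)) (total_pages : Int) : List Int :=
  let best_start := page_breaks.foldl (pvStep chunk_start) none
  let best_end := page_breaks.foldl (pvStep chunk_end) none
  PySem.List.pyRange (pvPage best_start) (min (pvPage best_end) total_pages + 1) 1

-- ===== PRECONDITION & SPEC =====
def Spec_get_pages_for_chunk_py (chunk_start : Int) (chunk_end : Int) (page_breaks : List (Int × Int)) (total_pages : Int) (out : List Int) : Prop := out = get_pages_for_chunk_py_alt chunk_start chunk_end page_breaks total_pages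
instance (chunk_start : Int) (chunk_end : Int) (page_breaks : List (Int × Int)) (total_pages : Int) (out : List Int) : Decidable (Spec_get_pages_for_chunk_py chunk_start chunk_end page_breaks total_pages out) := by unfold Spec_get_pages_for_chunk_py; infer_instance

-- ===== CLAIM (what is proved, stated in full; the proofs are below) =====
def Claim_equal_get_pages_for_chunk_py : Prop := ∀ (chunk_start : Int) (chunk_end : Int) (page_breaks : List (Int × Int)) (total_pages : Int), Dom_get_pages_for_chunk_py chunk_start chunk_end page_breaks total_pages → Spec_get_pages_for_chunk_py chunk_start chunk_end page_breaks total_pages (get_pages_for_chunk_py chunk_start chunk_end page_breaks total_pages)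

-- ===== LEMMAS AND PROOFS =====

-- the strict lexicographic comparison sorted2 uses on (line, page) pairs
def pvBefore (a b : Int × Int) : Bool :=
  decide (a.1 < b.1) || (!decide (b.1 < a.1) && decide (a.2 < b.2))

theorem pvBefore_true_iff (a b : Int × Int) :
    pvBefore a b = true ↔ (a.1 < b.1 ∨ (a.1 = b.1 ∧ a.2 < b.2)) := by
  simp [pvBefore]; omega

theorem pvBefore_false_iff (a b : Int × Int) :
    pvBefore a b = false ↔ (b.1 < a.1 ∨ (b.1 = a.1 ∧ b.2 ≤ a.2)) := by
  simp [pvBefore]; omega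

theorem pvSorted2_eq (pb : List (Int × Int)) :
    PySem.List.sorted2 pb Prod.fst Prod.snd =
      List.foldl (fun acc x => PySem.List.insertBy pvBefore x acc) [] pb := rfl

theorem pairwise_insertBy (x : Int × Int) (ys : List (Int × Int))
    (h : ys.Pairwise (fun a b => pvBefore b a = false)) :
    (PySem.List.insertBy pvBefore x ys).Pairwise (fun a b => pvBefore b a = false) := by
  induction ys with
  | nil => simp [PySem.List.insertBy]
  | cons y ys ih =>
    rw [List.pairwise_cons] at h
    by_cases hxy : pvBefore x y = true
    · simp only [PySem.List.insertBy, hxy, if_true]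
      rw [pvBefore_true_iff] at hxy
      refine List.Pairwise.cons ?_ (List.Pairwise.cons h.1 h.2)
      intro z hz
      rw [pvBefore_false_iff]
      rcases List.mem_cons.mp hz with hz | hz
      · subst hz; omega
      · have hyz := h.1 z hz
        rw [pvBefore_false_iff] at hyz
        omega
    · rw [Bool.not_eq_true] at hxy
      simp only [PySem.List.insertBy, hxy]
      refine List.Pairwise.cons ?_ (ih h.2)
      intro z hz
      rcases (PySem.List.mem_insertBy pvBefore x z ys).mp hz with hz | hz
      · subst hz; exact hxy
      · exact h.1 z hz

theorem pairwise_foldl_insertBy (pb : List (Int × Int)) (acc : List (Int × Int))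
    (h : acc.Pairwise (fun a b => pvBefore b a = false)) :
    (List.foldl (fun acc x => PySem.List.insertBy pvBefore x acc) acc pb).Pairwise
      (fun a b => pvBefore b a = false) := by
  induction pb generalizing acc with
  | nil => exact h
  | cons x pb ih => exact ih _ (pairwise_insertBy x acc h)

-- a fold over breaks all strictly past the threshold changes nothing
theorem foldl_pvStep_of_gt (thr : Int) (s : List (Int × Int)) (b : Option (Int × Int))
    (h : ∀ x ∈ s, thr < x.1) : s.foldl (pvStep thr) b = b := by
  induction s generalizing b with
  | nil => rfl
  | cons x s ih =>
    have hx := h x (by simp)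
    have hs : ∀ y ∈ s, thr < y.1 := fun y hy => h y (by simp [hy])
    have hstep : pvStep thr b x = b := by
      cases b with
      | none => simp [pvStep]; omega
      | some m => simp [pvStep]; omega
    rw [List.foldl_cons, hstep, ih _ hs]

def pvOptLe : Option (Int × Int) → (Int × Int) → Prop
  | none, _ => True
  | some m, x => m.1 < x.1 ∨ (m.1 = x.1 ∧ m.2 ≤ x.2)

-- on a lexicographically sorted list, A's break-loop computes B's running maximum
theorem findPage_eq_foldl (thr : Int) (s : List (Int × Int))
    (hs : s.Pairwise (fun a b => pvBefore b a = false)) (b : Option (Int × Int))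
    (hb : ∀ x ∈ s, pvOptLe b x) :
    pvFindPage thr s (pvPage b) = pvPage (s.foldl (pvStep thr) b) := by
  induction s generalizing b with
  | nil => rfl
  | cons x s ih =>
    rw [List.pairwise_cons] at hs
    rcases x with ⟨l, p⟩
    by_cases hl : l ≤ thr
    · have hstep : pvStep thr b (l, p) = some (l, p) := by
        cases b with
        | none => simp [pvStep, hl]
        | some m =>
          have := hb (l, p) (by simp)
          simp only [pvOptLe] at this
          simp only [pvStep, if_pos (And.intro hl this)]
      have hnext : ∀ y ∈ s, pvOptLe (some (l, p)) y := by
        intro y hy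
        have := hs.1 y hy
        rw [pvBefore_false_iff] at this
        simp only [pvOptLe]
        omega
      have hp : pvFindPage thr ((l, p) :: s) (pvPage b) = pvFindPage thr s (pvPage (some (l, p))) := by
        simp [pvFindPage, hl, pvPage]
      rw [hp, List.foldl_cons, hstep, ih hs.2 (some (l, p)) hnext]
    · have hrest : ∀ y ∈ s, thr < y.1 := by
        intro y hy
        have := hs.1 y hy
        rw [pvBefore_false_iff] at this
        omega
      have hstep : pvStep thr b (l, p) = b := by
        cases b with
        | none => simp [pvStep]; omega
        | some m => simp [pvStep]; omega
      simp only [pvFindPage, hl, if_false, List.foldl_cons, hstep,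
        foldl_pvStep_of_gt thr s b hrest]

theorem pvStep_comm (thr : Int) (b : Option (Int × Int)) (x y : Int × Int) :
    pvStep thr (pvStep thr b x) y = pvStep thr (pvStep thr b y) x := by
  rcases x with ⟨x1, x2⟩; rcases y with ⟨y1, y2⟩
  rcases b with _ | ⟨m1, m2⟩ <;>
    simp only [pvStep] <;> split_ifs <;>
    (try simp only [pvStep]) <;> (try split_ifs) <;>
    simp_all [Prod.ext_iff] <;> omega

theorem foldl_pvStep_perm (thr : Int) {s t : List (Int × Int)} (h : s.Perm t) :
    ∀ b, s.foldl (pvStep thr) b = t.foldl (pvStep thr) b := by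
  induction h with
  | nil => intro b; rfl
  | cons x _ ih => intro b; simp only [List.foldl_cons]; exact ih _
  | swap x y l => intro b; simp only [List.foldl_cons, pvStep_comm]
  | trans _ _ ih1 ih2 => intro b; rw [ih1, ih2]

-- both boundary computations agree
theorem page_agree (thr : Int) (pb : List (Int × Int)) :
    pvFindPage thr (PySem.List.sorted2 pb Prod.fst Prod.snd) 1 =
      pvPage (pb.foldl (pvStep thr) none) := by
  have hperm : (PySem.List.sorted2 pb Prod.fst Prod.snd).Perm pb :=
    PySem.List.sorted2_perm pb Prod.fst Prod.snd false
  have hpw : (PySem.List.sorted2 pb Prod.fst Prod.snd).Pairwise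
      (fun a b => pvBefore b a = false) := by
    rw [pvSorted2_eq]; exact pairwise_foldl_insertBy pb [] (by simp)
  have h1 : pvFindPage thr (PySem.List.sorted2 pb Prod.fst Prod.snd) 1 =
      pvPage ((PySem.List.sorted2 pb Prod.fst Prod.snd).foldl (pvStep thr) none) :=
    findPage_eq_foldl thr _ hpw none (fun x _ => trivial)
  rw [h1, foldl_pvStep_perm thr hperm]

-- pyRange a b 1 is empty when b ≤ a
theorem pyRange_one_nil (a b : Int) (h : b ≤ a) : PySem.List.pyRange a b 1 = [] := by
  apply List.eq_nil_iff_forall_not_mem.mpr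
  intro x hx
  rw [PySem.List.mem_pyRange_one] at hx
  omega

theorem pyRange_one_pairwise_lt (n : ℕ) : ∀ a b : Int, (b - a).toNat = n →
    (PySem.List.pyRange a b 1).Pairwise (· < ·) := by
  induction n with
  | zero => intro a b h; rw [pyRange_one_nil a b (by omega)]; simp
  | succ n ih =>
    intro a b h
    rw [PySem.List.pyRange_one_cons (by omega)]
    refine List.Pairwise.cons ?_ (ih (a + 1) b (by omega))
    intro x hx
    rw [PySem.List.mem_pyRange_one] at hx
    omega

theorem filter_pyRange_one (n : ℕ) : ∀ a b t : Int, (b - a).toNat = n →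
    (PySem.List.pyRange a b 1).filter (fun x => decide (x ≤ t)) =
      PySem.List.pyRange a (min b (t + 1)) 1 := by
  induction n with
  | zero =>
    intro a b t h
    rw [pyRange_one_nil a b (by omega), pyRange_one_nil a (min b (t + 1)) (by omega)]
    rfl
  | succ n ih =>
    intro a b t h
    rw [PySem.List.pyRange_one_cons (by omega), List.filter_cons]
    by_cases hat : a ≤ t
    · rw [PySem.List.pyRange_one_cons (a := a) (b := min b (t + 1)) (by omega)]
      simp only [hat, decide_true, if_true]
      rw [ih (a + 1) b t (by omega)]
    · rw [if_neg (by simp [hat])]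
      rw [ih (a + 1) b t (by omega), pyRange_one_nil a (min b (t + 1)) (by omega),
        pyRange_one_nil (a + 1) (min b (t + 1)) (by omega)]

-- the add-if-≤ loop over a duplicate-free list builds exactly the filtered list
theorem foldl_add_if_le (t : Int) (l : List Int) : ∀ s : List Int, l.Nodup →
    (∀ x ∈ l, x ∉ s) →
    l.foldl (fun s x => if x ≤ t then PySem.Set.add s x else s) s =
      s ++ l.filter (fun x => decide (x ≤ t)) := by
  induction l with
  | nil => intro s _ _; simp
  | cons x l ih =>
    intro s hnd hs
    rw [List.nodup_cons] at hnd
    rw [List.foldl_cons, List.filter_cons]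
    by_cases hx : x ≤ t
    · have hadd : PySem.Set.add s x = s ++ [x] := by
        have hxs : x ∉ s := hs x (by simp)
        simp [PySem.Set.add, PySem.Set.contains, hxs]
      simp only [hx, decide_true, if_true, hadd]
      rw [ih (s ++ [x]) hnd.2 ?_]
      · simp
      · intro y hy hmem
        rcases List.mem_append.mp hmem with h' | h'
        · exact hs y (by simp [hy]) h'
        · rw [List.mem_singleton] at h'; subst h'; exact hnd.1 hy
    · rw [if_neg hx, if_neg (by simp [hx] : ¬ (decide (x ≤ t) = true))]
      exact ih s hnd.2 (fun y hy => hs y (by simp [hy]))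

-- the whole pages block of A collapses to B's direct range
theorem pages_eq (sp ep tp : Int) :
    PySem.List.sorted
      ((PySem.List.pyRange sp (ep + 1) 1).foldl
        (fun s page => if page ≤ tp then PySem.Set.add s page else s) PySem.Set.empty)
      (fun x => x) =
      PySem.List.pyRange sp (min ep tp + 1) 1 := by
  have hpw : (PySem.List.pyRange sp (ep + 1) 1).Pairwise (· < ·) :=
    pyRange_one_pairwise_lt _ sp (ep + 1) rfl
  have hnd : (PySem.List.pyRange sp (ep + 1) 1).Nodup := hpw.imp (fun h => ne_of_lt h)
  have h1 : (PySem.List.pyRange sp (ep + 1) 1).foldl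
      (fun s page => if page ≤ tp then PySem.Set.add s page else s) PySem.Set.empty =
      (PySem.List.pyRange sp (ep + 1) 1).filter (fun x => decide (x ≤ tp)) := by
    have := foldl_add_if_le tp (PySem.List.pyRange sp (ep + 1) 1) [] hnd (by simp)
    simpa [PySem.Set.empty] using this
  rw [h1, filter_pyRange_one _ sp (ep + 1) tp rfl]
  have hmin : min (ep + 1) (tp + 1) = min ep tp + 1 := by omega
  rw [hmin]
  apply PySem.List.sorted_eq_of_perm_of_pairwise_lt
  · exact List.Perm.refl _
  · exact pyRange_one_pairwise_lt _ sp (min ep tp + 1) rfl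

-- ===== VERDICT (by name: the statement is the Claim_ definition above) =====
theorem get_pages_for_chunk_py_spec : Claim_equal_get_pages_for_chunk_py := by
  intro chunk_start chunk_end page_breaks total_pages _
  unfold Spec_get_pages_for_chunk_py
  simp only [get_pages_for_chunk_py, get_pages_for_chunk_py_alt]
  rw [page_agree chunk_start page_breaks, page_agree chunk_end page_breaks]
  exact pages_eq _ _ _
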